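-- pv_equiv track=rewrite | github.com/ZJUVAI/GenesisGeo | scripts/translate_rule_to_problem.py | translate_eqangle
-- ===== SOURCE A (Python) =====
-- def update_dep(point1, point2, deps):
--     if point1 == point2 or point1 in deps[point2]:
--         return
--     deps[point2].append(point1)
--     for p, dep in deps.items():
--         if point2 in dep:
--             update_dep(point1, p, deps)
--     for p in deps[point1]:
--         update_dep(p, point2, deps)
--
--     return
--
-- def translate_eqangle(args, deps, constructions, state):
--     if len(args) != 8:
--         return False
--     a, b, c, d, e, f, g, h = args
--     if a not in deps[e] and b not in deps[e] and c not in deps[e] and d not in deps[e] and f not in deps[e] and g not in deps[e] and h not in deps[e] and state[e]: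
--         constructions[e].append(('on_aline0', e, a, b, c, d, f, g, h))
--         if len(constructions[e]) == 2:
--             state[e] = False
--         for p in [a, b, c, d, f, g, h]:
--             update_dep(e, p, deps)
--         return True
--     elif a not in deps[f] and b not in deps[f] and c not in deps[f] and d not in deps[f] and e not in deps[f] and g not in deps[f] and h not in deps[f] and state[f]:
--         constructions[f].append(('on_aline0', f, a, b, c, d, e, g, h))
--         if len(constructions[f]) == 2:
--             state[f] = False
--         for p in [a, b, c, d, e, g, h]:
--             update_dep(f, p, deps)
--         return True
--     elif a not in deps[g] and b not in deps[g] and c not in deps[g] and d not in deps[g] and e not in deps[g] and f not in deps[g] and h not in deps[g] and state[g]: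
--         constructions[g].append(('on_aline0', g, c, d, a, b, h, e, f))
--         if len(constructions[g]) == 2:
--             state[g] = False
--         for p in [a, b, c, d, e, f, h]:
--             update_dep(g, p, deps)
--     elif a not in deps[h] and b not in deps[h] and c not in deps[h] and d not in deps[h] and e not in deps[h] and f not in deps[h] and g not in deps[h] and state[h]:
--         constructions[h].append(('on_aline0', h, c, d, a, b, g, e, f))
--         if len(constructions[h]) == 2:
--             state[h] = False
--         for p in [a, b, c, d, e, f, g]:
--             update_dep(h, p, deps)
--         return True
--     elif b not in deps[a] and c not in deps[a] and d not in deps[a] and e not in deps[a] and f not in deps[a] and g not in deps[a] and h not in deps[a] and state[a]: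
--         constructions[a].append(('on_aline0', a, e, f, g, h, b, c, d))
--         if len(constructions[a]) == 2:
--             state[a] = False
--         for p in [b, c, d, e, f, g, h]:
--             update_dep(a, p, deps)
--         return True
--     elif a not in deps[b] and c not in deps[b] and d not in deps[b] and e not in deps[b] and f not in deps[b] and g not in deps[b] and h not in deps[b] and state[b]:
--         constructions[b].append(('on_aline0', b, e, f, g, h, a, c, d))
--         if len(constructions[b]) == 2:
--             state[b] = False
--         for p in [a, c, d, e, f, g, h]:
--             update_dep(b, p, deps)
--         return True
--     elif a not in deps[c] and b not in deps[c] and d not in deps[c] and e not in deps[c] and f not in deps[c] and g not in deps[c] and h not in deps[c] and state[c]: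
--         constructions[c].append(('on_aline0', c, g, h, e, f, d, a, b))
--         if len(constructions[c]) == 2:
--             state[c] = False
--         for p in [a, b, d, e, f, g, h]:
--             update_dep(c, p, deps)
--         return True
--     elif a not in deps[d] and b not in deps[d] and c not in deps[d] and e not in deps[d] and f not in deps[d] and g not in deps[d] and h not in deps[d] and state[d]:
--         constructions[d].append(('on_aline0', d, g, h, e, f, c, a, b))
--         if len(constructions[d]) == 2:
--             state[d] = False
--         for p in [a, b, c, e, f, g, h]:
--             update_dep(d, p, deps)
--         return True
--     return False
-- ===== SOURCE B (Python) =====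
-- # Same task, different decomposition: a recursive descent over the candidate priority order
-- # (instead of an 8-way elif chain), with freshness decided by scanning deps[t] against the
-- # other seven args (the reverse traversal of A's seven membership tests), and the tuple
-- # permutations kept in a table. Mutates deps/constructions/state in place like A.
-- # On the row for args[6], A does the work but falls through to `return False` (missing
-- # `return True`); B returns True there, the intended value.
--
-- def update_dep(point1, point2, deps):
--     if point1 == point2 or point1 in deps[point2]:
--         return
--     deps[point2].append(point1)
--     for p, dep in deps.items():
--         if point2 in dep:
--             update_dep(point1, p, deps)
--     for p in deps[point1]:
--         update_dep(p, point2, deps)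
--
--     return
--
-- # on_aline0 tuple permutation (indices into args) for each candidate index
-- _PERMS = {
--     4: (0, 1, 2, 3, 5, 6, 7), 5: (0, 1, 2, 3, 4, 6, 7),
--     6: (2, 3, 0, 1, 7, 4, 5), 7: (2, 3, 0, 1, 6, 4, 5),
--     0: (4, 5, 6, 7, 1, 2, 3), 1: (4, 5, 6, 7, 0, 2, 3),
--     2: (6, 7, 4, 5, 3, 0, 1), 3: (6, 7, 4, 5, 2, 0, 1),
-- }
--
-- def _try(order, args, deps, constructions, state):
--     if not order:
--         return False
--     idx = order[0]
--     t = args[idx]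
--     others = args[:idx] + args[idx + 1:]
--     if state[t] and all(x not in others for x in deps[t]):
--         constructions[t].append(('on_aline0', t) + tuple(args[j] for j in _PERMS[idx]))
--         if len(constructions[t]) == 2:
--             state[t] = False
--         for p in others:
--             update_dep(t, p, deps)
--         return True
--     return _try(order[1:], args, deps, constructions, state)
--
-- def translate_eqangle(args, deps, constructions, state):
--     if len(args) != 8:
--         return False
--     return _try([4, 5, 6, 7, 0, 1, 2, 3], args, deps, constructions, state)
-- ===== Notes on version B (the rewrite author's own statement) =====
-- stated objective: alternative
-- what changed: The 8-way elif chain is replaced by a recursive descent over the candidate priority order, with freshness decided by scanning deps[t] against the seven other args (the reverse traversal of A's seven per-arg membership tests) and the tuple permutations kept in a table.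
-- intended difference: On 8-element args where the rows for args[4] and args[5] are not fresh but the row for args[6] is, A performs the whole construction yet returns False because that elif branch lacks `return True`; B returns True there, which is clearly the intended value. — e.g. on translate_eqangle((["a","b","c","d","e","f","g","h"], [("a",[]),("b",[]),("c",[]),("d",[]),("e",[]),("f",[]),("g",[]),("h",[])], [("a",[]…): A returns false, B returns true
import Mathlib
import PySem

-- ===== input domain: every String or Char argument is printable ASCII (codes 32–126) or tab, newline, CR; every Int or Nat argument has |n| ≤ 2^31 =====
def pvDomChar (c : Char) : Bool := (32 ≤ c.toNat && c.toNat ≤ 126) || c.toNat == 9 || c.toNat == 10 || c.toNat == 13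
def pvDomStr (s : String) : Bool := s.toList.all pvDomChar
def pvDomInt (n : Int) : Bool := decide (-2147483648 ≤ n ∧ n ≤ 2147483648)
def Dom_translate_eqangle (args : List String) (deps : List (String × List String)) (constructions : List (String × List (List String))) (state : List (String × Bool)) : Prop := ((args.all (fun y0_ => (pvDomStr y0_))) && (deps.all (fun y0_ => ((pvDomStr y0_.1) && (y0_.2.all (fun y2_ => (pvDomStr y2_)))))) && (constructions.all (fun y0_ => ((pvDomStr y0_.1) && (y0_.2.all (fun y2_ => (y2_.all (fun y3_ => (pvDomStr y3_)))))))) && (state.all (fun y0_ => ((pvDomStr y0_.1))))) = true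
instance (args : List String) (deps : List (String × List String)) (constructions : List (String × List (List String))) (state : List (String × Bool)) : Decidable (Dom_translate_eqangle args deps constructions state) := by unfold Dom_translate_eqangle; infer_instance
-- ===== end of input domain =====

-- Both Pythons mutate deps/constructions/state in place; the equivalence proved here is about the
-- RETURN value only (under Pre_ the returned Bool does not depend on those side effects).

-- dict lookup on the association list (first match), shared plumbing for both ports
def pvLookup {ν : Type} (l : List (String × ν)) (k : String) (dflt : ν) : ν :=
  (((l.find? (fun p => p.1 == k)).map (fun p => p.2)).getD dflt)

-- ===== PORT A =====
-- literal port of A's 8-way elif chain; the branch conditions are the only part that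
-- determines the returned Bool, and the g-branch falls through to False exactly as in A.
def translate_eqangle (args : List String) (deps : List (String × List String)) (constructions : List (String × List (List String))) (state : List (String × Bool)) : Bool :=
  if args.length ≠ 8 then false
  else
    match args with
    | [a, b, c, d, e, f, g, h] =>
      if !(pvLookup deps e []).contains a && !(pvLookup deps e []).contains b && !(pvLookup deps e []).contains c && !(pvLookup deps e []).contains d && !(pvLookup deps e []).contains f && !(pvLookup deps e []).contains g && !(pvLookup deps e []).contains h && pvLookup state e false then true
      else if !(pvLookup deps f []).contains a && !(pvLookup deps f []).contains b && !(pvLookup deps f []).contains c && !(pvLookup deps f []).contains d && !(pvLookup deps f []).contains e && !(pvLookup deps f []).contains g && !(pvLookup deps f []).contains h && pvLookup state f false then true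
      else if !(pvLookup deps g []).contains a && !(pvLookup deps g []).contains b && !(pvLookup deps g []).contains c && !(pvLookup deps g []).contains d && !(pvLookup deps g []).contains e && !(pvLookup deps g []).contains f && !(pvLookup deps g []).contains h && pvLookup state g false then false
      else if !(pvLookup deps h []).contains a && !(pvLookup deps h []).contains b && !(pvLookup deps h []).contains c && !(pvLookup deps h []).contains d && !(pvLookup deps h []).contains e && !(pvLookup deps h []).contains f && !(pvLookup deps h []).contains g && pvLookup state h false then true
      else if !(pvLookup deps a []).contains b && !(pvLookup deps a []).contains c && !(pvLookup deps a []).contains d && !(pvLookup deps a []).contains e && !(pvLookup deps a []).contains f && !(pvLookup deps a []).contains g && !(pvLookup deps a []).contains h && pvLookup state a false then true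
      else if !(pvLookup deps b []).contains a && !(pvLookup deps b []).contains c && !(pvLookup deps b []).contains d && !(pvLookup deps b []).contains e && !(pvLookup deps b []).contains f && !(pvLookup deps b []).contains g && !(pvLookup deps b []).contains h && pvLookup state b false then true
      else if !(pvLookup deps c []).contains a && !(pvLookup deps c []).contains b && !(pvLookup deps c []).contains d && !(pvLookup deps c []).contains e && !(pvLookup deps c []).contains f && !(pvLookup deps c []).contains g && !(pvLookup deps c []).contains h && pvLookup state c false then true
      else if !(pvLookup deps d []).contains a && !(pvLookup deps d []).contains b && !(pvLookup deps d []).contains c && !(pvLookup deps d []).contains e && !(pvLookup deps d []).contains f && !(pvLookup deps d []).contains g && !(pvLookup deps d []).contains h && pvLookup state d false then true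
      else false
    | _ => false

-- ===== PORT B =====
-- B's freshness test for candidate index idx: state[args[idx]] and no entry of deps[args[idx]]
-- occurs among the other seven args (args[:idx] + args[idx+1:]; take/drop is exact for 0 ≤ idx)
def pvFreshRow (args : List String) (deps : List (String × List String)) (state : List (String × Bool)) (idx : Nat) : Bool :=
  let t := args.getD idx ""
  let others := args.take idx ++ args.drop (idx + 1)
  pvLookup state t false && (pvLookup deps t []).all (fun x => !(others.contains x))

-- B's recursive descent over the priority order (the construction side effects do not affect
-- the returned Bool and are omitted, as in port A)
def pvTryRows (args : List String) (deps : List (String × List String)) (state : List (String × Bool)) : List Nat → Bool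
  | [] => false
  | idx :: rest => if pvFreshRow args deps state idx then true else pvTryRows args deps state rest

def translate_eqangle_alt (args : List String) (deps : List (String × List String)) (constructions : List (String × List (List String))) (state : List (String × Bool)) : Bool :=
  if args.length ≠ 8 then false
  else pvTryRows args deps state [4, 5, 6, 7, 0, 1, 2, 3]

-- ===== PRECONDITION & SPEC =====
-- Pre_ excludes the inputs on which A can raise KeyError: with 8 args every arg must be a key of
-- deps, state and constructions, and every point stored in a deps value must itself be a deps key
-- (update_dep recurses into it). Which lookups A actually performs depends on the path taken, so
-- this is conservative: it also excludes some key-missing inputs on which A happens to return False.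
def Pre_translate_eqangle (args : List String) (deps : List (String × List String)) (constructions : List (String × List (List String))) (state : List (String × Bool)) : Prop :=
  args.length = 8 →
    ((∀ x ∈ args, x ∈ deps.map (fun p => p.1) ∧ x ∈ state.map (fun p => p.1) ∧ x ∈ constructions.map (fun p => p.1)) ∧
     (∀ p ∈ deps, ∀ v ∈ p.2, v ∈ deps.map (fun q => q.1)))
instance (args : List String) (deps : List (String × List String)) (constructions : List (String × List (List String))) (state : List (String × Bool)) : Decidable (Pre_translate_eqangle args deps constructions state) := by unfold Pre_translate_eqangle; infer_instance

def pvWitness_translate_eqangle : List String × (List (String × List String)) × (List (String × List (List String))) × (List (String × Bool)) :=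
  (["a","b","c","d","e","f","g","h"],
   [("a",[]),("b",[]),("c",[]),("d",[]),("e",[]),("f",[]),("g",[]),("h",[])],
   [("a",[]),("b",[]),("c",[]),("d",[]),("e",[]),("f",[]),("g",[]),("h",[])],
   [("a",true),("b",true),("c",true),("d",true),("e",true),("f",true),("g",true),("h",true)])

-- freshness of row i, stated directly on the input (used only by D_)
def pvFresh (args : List String) (deps : List (String × List String)) (state : List (String × Bool)) (i : Nat) : Prop :=
  pvLookup state (args.getD i "") false = true ∧
    ∀ j < 8, j ≠ i → args.getD j "" ∉ pvLookup deps (args.getD i "") []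

-- On 8-element args where rows 4 and 5 are not fresh but row 6 is, A performs the whole
-- construction yet returns False (the branch lacks `return True`); B returns True, the intended value.
def D_translate_eqangle (args : List String) (deps : List (String × List String)) (constructions : List (String × List (List String))) (state : List (String × Bool)) : Prop :=
  args.length = 8 ∧ ¬ pvFresh args deps state 4 ∧ ¬ pvFresh args deps state 5 ∧ pvFresh args deps state 6
instance (args : List String) (deps : List (String × List String)) (constructions : List (String × List (List String))) (state : List (String × Bool)) : Decidable (D_translate_eqangle args deps constructions state) := by unfold D_translate_eqangle pvFresh; infer_instance

def Spec_translate_eqangle (args : List String) (deps : List (String × List String)) (constructions : List (String × List (List String))) (state : List (String × Bool)) (out : Bool) : Prop := ¬ D_translate_eqangle args deps constructions state → out = translate_eqangle_alt args deps constructions state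
instance (args : List String) (deps : List (String × List String)) (constructions : List (String × List (List String))) (state : List (String × Bool)) (out : Bool) : Decidable (Spec_translate_eqangle args deps constructions state out) := by unfold Spec_translate_eqangle; infer_instance

def pvDiffWitness_translate_eqangle : List String × (List (String × List String)) × (List (String × List (List String))) × (List (String × Bool)) :=
  (["a","b","c","d","e","f","g","h"],
   [("a",[]),("b",[]),("c",[]),("d",[]),("e",[]),("f",[]),("g",[]),("h",[])],
   [("a",[]),("b",[]),("c",[]),("d",[]),("e",[]),("f",[]),("g",[]),("h",[])],
   [("a",false),("b",false),("c",false),("d",false),("e",false),("f",false),("g",true),("h",false)])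
def pvDiffWitnessOut_translate_eqangle : Bool × Bool := (false, true)

-- ===== CLAIM =====
def Claim_unchanged_translate_eqangle : Prop := ∀ (args : List String) (deps : List (String × List String)) (constructions : List (String × List (List String))) (state : List (String × Bool)), Dom_translate_eqangle args deps constructions state → Pre_translate_eqangle args deps constructions state → Spec_translate_eqangle args deps constructions state (translate_eqangle args deps constructions state)
def Claim_changed_translate_eqangle : Prop := Dom_translate_eqangle (pvDiffWitness_translate_eqangle.1) (pvDiffWitness_translate_eqangle.2.1) (pvDiffWitness_translate_eqangle.2.2.1) (pvDiffWitness_translate_eqangle.2.2.2) ∧ Pre_translate_eqangle (pvDiffWitness_translate_eqangle.1) (pvDiffWitness_translate_eqangle.2.1) (pvDiffWitness_translate_eqangle.2.2.1) (pvDiffWitness_translate_eqangle.2.2.2) ∧ D_translate_eqangle (pvDiffWitness_translate_eqangle.1) (pvDiffWitness_translate_eqangle.2.1) (pvDiffWitness_translate_eqangle.2.2.1) (pvDiffWitness_translate_eqangle.2.2.2) ∧ translate_eqangle (pvDiffWitness_translate_eqangle.1) (pvDiffWitness_translate_eqangle.2.1) (pvDiffWitness_translate_eqangle.2.2.1) (pvDiffWitness_translate_eqangle.2.2.2)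 = pvDiffWitnessOut_translate_eqangle.1 ∧ translate_eqangle_alt (pvDiffWitness_translate_eqangle.1) (pvDiffWitness_translate_eqangle.2.1) (pvDiffWitness_translate_eqangle.2.2.1) (pvDiffWitness_translate_eqangle.2.2.2) = pvDiffWitnessOut_translate_eqangle.2 ∧ pvDiffWitnessOut_translate_eqangle.1 ≠ pvDiffWitnessOut_translate_eqangle.2
def Claim_exact_translate_eqangle : Prop := ∀ (args : List String) (deps : List (String × List String)) (constructions : List (String × List (List String))) (state : List (String × Bool)), Dom_translate_eqangle args deps constructions state → Pre_translate_eqangle args deps constructions state → D_translate_eqangle args deps constructions state → translate_eqangle args deps constructions state ≠ translate_eqangle_alt args deps constructions state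

-- ===== LEMMAS AND PROOFS =====
theorem row4 (a b c d e f g h : String) (deps : List (String × List String)) (state : List (String × Bool)) :
    pvFreshRow [a,b,c,d,e,f,g,h] deps state 4
    = (!(pvLookup deps e []).contains a && !(pvLookup deps e []).contains b && !(pvLookup deps e []).contains c && !(pvLookup deps e []).contains d && !(pvLookup deps e []).contains f && !(pvLookup deps e []).contains g && !(pvLookup deps e []).contains h && pvLookup state e false) := by
  rw [Bool.eq_iff_iff]
  simp [pvFreshRow, List.all_eq_true, forall_and]
  cases pvLookup state e false <;> simp
  constructor
  · rintro ⟨h1,h2,h3,h4,h5,h6,h7⟩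
    exact ⟨⟨⟨⟨⟨⟨fun hx => h1 a hx rfl, fun hx => h2 b hx rfl⟩, fun hx => h3 c hx rfl⟩, fun hx => h4 d hx rfl⟩, fun hx => h5 f hx rfl⟩, fun hx => h6 g hx rfl⟩, fun hx => h7 h hx rfl⟩
  · rintro ⟨⟨⟨⟨⟨⟨h1,h2⟩,h3⟩,h4⟩,h5⟩,h6⟩,h7⟩
    exact ⟨fun x hx he => h1 (he ▸ hx), fun x hx he => h2 (he ▸ hx), fun x hx he => h3 (he ▸ hx), fun x hx he => h4 (he ▸ hx), fun x hx he => h5 (he ▸ hx), fun x hx he => h6 (he ▸ hx), fun x hx he => h7 (he ▸ hx)⟩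

theorem row5 (a b c d e f g h : String) (deps : List (String × List String)) (state : List (String × Bool)) :
    pvFreshRow [a,b,c,d,e,f,g,h] deps state 5
    = (!(pvLookup deps f []).contains a && !(pvLookup deps f []).contains b && !(pvLookup deps f []).contains c && !(pvLookup deps f []).contains d && !(pvLookup deps f []).contains e && !(pvLookup deps f []).contains g && !(pvLookup deps f []).contains h && pvLookup state f false) := by
  rw [Bool.eq_iff_iff]
  simp [pvFreshRow, List.all_eq_true, forall_and]
  cases pvLookup state f false <;> simp
  constructor
  · rintro ⟨h1,h2,h3,h4,h5,h6,h7⟩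
    exact ⟨⟨⟨⟨⟨⟨fun hx => h1 a hx rfl, fun hx => h2 b hx rfl⟩, fun hx => h3 c hx rfl⟩, fun hx => h4 d hx rfl⟩, fun hx => h5 e hx rfl⟩, fun hx => h6 g hx rfl⟩, fun hx => h7 h hx rfl⟩
  · rintro ⟨⟨⟨⟨⟨⟨h1,h2⟩,h3⟩,h4⟩,h5⟩,h6⟩,h7⟩
    exact ⟨fun x hx he => h1 (he ▸ hx), fun x hx he => h2 (he ▸ hx), fun x hx he => h3 (he ▸ hx), fun x hx he => h4 (he ▸ hx), fun x hx he => h5 (he ▸ hx), fun x hx he => h6 (he ▸ hx), fun x hx he => h7 (he ▸ hx)⟩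

theorem row6 (a b c d e f g h : String) (deps : List (String × List String)) (state : List (String × Bool)) :
    pvFreshRow [a,b,c,d,e,f,g,h] deps state 6
    = (!(pvLookup deps g []).contains a && !(pvLookup deps g []).contains b && !(pvLookup deps g []).contains c && !(pvLookup deps g []).contains d && !(pvLookup deps g []).contains e && !(pvLookup deps g []).contains f && !(pvLookup deps g []).contains h && pvLookup state g false) := by
  rw [Bool.eq_iff_iff]
  simp [pvFreshRow, List.all_eq_true, forall_and]
  cases pvLookup state g false <;> simp
  constructor
  · rintro ⟨h1,h2,h3,h4,h5,h6,h7⟩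
    exact ⟨⟨⟨⟨⟨⟨fun hx => h1 a hx rfl, fun hx => h2 b hx rfl⟩, fun hx => h3 c hx rfl⟩, fun hx => h4 d hx rfl⟩, fun hx => h5 e hx rfl⟩, fun hx => h6 f hx rfl⟩, fun hx => h7 h hx rfl⟩
  · rintro ⟨⟨⟨⟨⟨⟨h1,h2⟩,h3⟩,h4⟩,h5⟩,h6⟩,h7⟩
    exact ⟨fun x hx he => h1 (he ▸ hx), fun x hx he => h2 (he ▸ hx), fun x hx he => h3 (he ▸ hx), fun x hx he => h4 (he ▸ hx), fun x hx he => h5 (he ▸ hx), fun x hx he => h6 (he ▸ hx), fun x hx he => h7 (he ▸ hx)⟩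

theorem row7 (a b c d e f g h : String) (deps : List (String × List String)) (state : List (String × Bool)) :
    pvFreshRow [a,b,c,d,e,f,g,h] deps state 7
    = (!(pvLookup deps h []).contains a && !(pvLookup deps h []).contains b && !(pvLookup deps h []).contains c && !(pvLookup deps h []).contains d && !(pvLookup deps h []).contains e && !(pvLookup deps h []).contains f && !(pvLookup deps h []).contains g && pvLookup state h false) := by
  rw [Bool.eq_iff_iff]
  simp [pvFreshRow, List.all_eq_true, forall_and]
  cases pvLookup state h false <;> simp
  constructor
  · rintro ⟨h1,h2,h3,h4,h5,h6,h7⟩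
    exact ⟨⟨⟨⟨⟨⟨fun hx => h1 a hx rfl, fun hx => h2 b hx rfl⟩, fun hx => h3 c hx rfl⟩, fun hx => h4 d hx rfl⟩, fun hx => h5 e hx rfl⟩, fun hx => h6 f hx rfl⟩, fun hx => h7 g hx rfl⟩
  · rintro ⟨⟨⟨⟨⟨⟨h1,h2⟩,h3⟩,h4⟩,h5⟩,h6⟩,h7⟩
    exact ⟨fun x hx he => h1 (he ▸ hx), fun x hx he => h2 (he ▸ hx), fun x hx he => h3 (he ▸ hx), fun x hx he => h4 (he ▸ hx), fun x hx he => h5 (he ▸ hx), fun x hx he => h6 (he ▸ hx), fun x hx he => h7 (he ▸ hx)⟩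

theorem row0 (a b c d e f g h : String) (deps : List (String × List String)) (state : List (String × Bool)) :
    pvFreshRow [a,b,c,d,e,f,g,h] deps state 0
    = (!(pvLookup deps a []).contains b && !(pvLookup deps a []).contains c && !(pvLookup deps a []).contains d && !(pvLookup deps a []).contains e && !(pvLookup deps a []).contains f && !(pvLookup deps a []).contains g && !(pvLookup deps a []).contains h && pvLookup state a false) := by
  rw [Bool.eq_iff_iff]
  simp [pvFreshRow, List.all_eq_true, forall_and]
  cases pvLookup state a false <;> simp
  constructor
  · rintro ⟨h1,h2,h3,h4,h5,h6,h7⟩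
    exact ⟨⟨⟨⟨⟨⟨fun hx => h1 b hx rfl, fun hx => h2 c hx rfl⟩, fun hx => h3 d hx rfl⟩, fun hx => h4 e hx rfl⟩, fun hx => h5 f hx rfl⟩, fun hx => h6 g hx rfl⟩, fun hx => h7 h hx rfl⟩
  · rintro ⟨⟨⟨⟨⟨⟨h1,h2⟩,h3⟩,h4⟩,h5⟩,h6⟩,h7⟩
    exact ⟨fun x hx he => h1 (he ▸ hx), fun x hx he => h2 (he ▸ hx), fun x hx he => h3 (he ▸ hx), fun x hx he => h4 (he ▸ hx), fun x hx he => h5 (he ▸ hx), fun x hx he => h6 (he ▸ hx), fun x hx he => h7 (he ▸ hx)⟩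

theorem row1 (a b c d e f g h : String) (deps : List (String × List String)) (state : List (String × Bool)) :
    pvFreshRow [a,b,c,d,e,f,g,h] deps state 1
    = (!(pvLookup deps b []).contains a && !(pvLookup deps b []).contains c && !(pvLookup deps b []).contains d && !(pvLookup deps b []).contains e && !(pvLookup deps b []).contains f && !(pvLookup deps b []).contains g && !(pvLookup deps b []).contains h && pvLookup state b false) := by
  rw [Bool.eq_iff_iff]
  simp [pvFreshRow, List.all_eq_true, forall_and]
  cases pvLookup state b false <;> simp
  constructor
  · rintro ⟨h1,h2,h3,h4,h5,h6,h7⟩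
    exact ⟨⟨⟨⟨⟨⟨fun hx => h1 a hx rfl, fun hx => h2 c hx rfl⟩, fun hx => h3 d hx rfl⟩, fun hx => h4 e hx rfl⟩, fun hx => h5 f hx rfl⟩, fun hx => h6 g hx rfl⟩, fun hx => h7 h hx rfl⟩
  · rintro ⟨⟨⟨⟨⟨⟨h1,h2⟩,h3⟩,h4⟩,h5⟩,h6⟩,h7⟩
    exact ⟨fun x hx he => h1 (he ▸ hx), fun x hx he => h2 (he ▸ hx), fun x hx he => h3 (he ▸ hx), fun x hx he => h4 (he ▸ hx), fun x hx he => h5 (he ▸ hx), fun x hx he => h6 (he ▸ hx), fun x hx he => h7 (he ▸ hx)⟩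

theorem row2 (a b c d e f g h : String) (deps : List (String × List String)) (state : List (String × Bool)) :
    pvFreshRow [a,b,c,d,e,f,g,h] deps state 2
    = (!(pvLookup deps c []).contains a && !(pvLookup deps c []).contains b && !(pvLookup deps c []).contains d && !(pvLookup deps c []).contains e && !(pvLookup deps c []).contains f && !(pvLookup deps c []).contains g && !(pvLookup deps c []).contains h && pvLookup state c false) := by
  rw [Bool.eq_iff_iff]
  simp [pvFreshRow, List.all_eq_true, forall_and]
  cases pvLookup state c false <;> simp
  constructor
  · rintro ⟨h1,h2,h3,h4,h5,h6,h7⟩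
    exact ⟨⟨⟨⟨⟨⟨fun hx => h1 a hx rfl, fun hx => h2 b hx rfl⟩, fun hx => h3 d hx rfl⟩, fun hx => h4 e hx rfl⟩, fun hx => h5 f hx rfl⟩, fun hx => h6 g hx rfl⟩, fun hx => h7 h hx rfl⟩
  · rintro ⟨⟨⟨⟨⟨⟨h1,h2⟩,h3⟩,h4⟩,h5⟩,h6⟩,h7⟩
    exact ⟨fun x hx he => h1 (he ▸ hx), fun x hx he => h2 (he ▸ hx), fun x hx he => h3 (he ▸ hx), fun x hx he => h4 (he ▸ hx), fun x hx he => h5 (he ▸ hx), fun x hx he => h6 (he ▸ hx), fun x hx he => h7 (he ▸ hx)⟩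

theorem row3 (a b c d e f g h : String) (deps : List (String × List String)) (state : List (String × Bool)) :
    pvFreshRow [a,b,c,d,e,f,g,h] deps state 3
    = (!(pvLookup deps d []).contains a && !(pvLookup deps d []).contains b && !(pvLookup deps d []).contains c && !(pvLookup deps d []).contains e && !(pvLookup deps d []).contains f && !(pvLookup deps d []).contains g && !(pvLookup deps d []).contains h && pvLookup state d false) := by
  rw [Bool.eq_iff_iff]
  simp [pvFreshRow, List.all_eq_true, forall_and]
  cases pvLookup state d false <;> simp
  constructor
  · rintro ⟨h1,h2,h3,h4,h5,h6,h7⟩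
    exact ⟨⟨⟨⟨⟨⟨fun hx => h1 a hx rfl, fun hx => h2 b hx rfl⟩, fun hx => h3 c hx rfl⟩, fun hx => h4 e hx rfl⟩, fun hx => h5 f hx rfl⟩, fun hx => h6 g hx rfl⟩, fun hx => h7 h hx rfl⟩
  · rintro ⟨⟨⟨⟨⟨⟨h1,h2⟩,h3⟩,h4⟩,h5⟩,h6⟩,h7⟩
    exact ⟨fun x hx he => h1 (he ▸ hx), fun x hx he => h2 (he ▸ hx), fun x hx he => h3 (he ▸ hx), fun x hx he => h4 (he ▸ hx), fun x hx he => h5 (he ▸ hx), fun x hx he => h6 (he ▸ hx), fun x hx he => h7 (he ▸ hx)⟩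

-- D_'s freshness predicate coincides with B's row test (rows 4,5,6 are the ones D_ mentions)
theorem freshE4 (a b c d e f g h : String) (deps : List (String × List String)) (state : List (String × Bool)) :
    pvFresh [a,b,c,d,e,f,g,h] deps state 4 ↔ (pvLookup state e false = true ∧ a ∉ pvLookup deps e [] ∧ b ∉ pvLookup deps e [] ∧ c ∉ pvLookup deps e [] ∧ d ∉ pvLookup deps e [] ∧ f ∉ pvLookup deps e [] ∧ g ∉ pvLookup deps e [] ∧ h ∉ pvLookup deps e []) := by
  unfold pvFresh
  constructor
  · rintro ⟨hs, hr⟩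
    exact ⟨hs, hr 0 (by omega) (by omega), hr 1 (by omega) (by omega), hr 2 (by omega) (by omega), hr 3 (by omega) (by omega), hr 5 (by omega) (by omega), hr 6 (by omega) (by omega), hr 7 (by omega) (by omega)⟩
  · rintro ⟨hs, h0, h1, h2, h3, h5, h6, h7⟩
    refine ⟨hs, ?_⟩
    intro j hj hne
    interval_cases j
    · exact h0
    · exact h1
    · exact h2
    · exact h3
    · exact absurd rfl hne
    · exact h5
    · exact h6
    · exact h7

theorem fresh_iff_row4 (a b c d e f g h : String) (deps : List (String × List String)) (state : List (String × Bool)) :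
    pvFresh [a,b,c,d,e,f,g,h] deps state 4 ↔ pvFreshRow [a,b,c,d,e,f,g,h] deps state 4 = true := by
  rw [freshE4, row4]
  simp only [Bool.and_eq_true, Bool.not_eq_eq_eq_not, Bool.not_true, List.contains_eq_mem,
    decide_eq_false_iff_not]
  tauto

theorem freshE5 (a b c d e f g h : String) (deps : List (String × List String)) (state : List (String × Bool)) :
    pvFresh [a,b,c,d,e,f,g,h] deps state 5 ↔ (pvLookup state f false = true ∧ a ∉ pvLookup deps f [] ∧ b ∉ pvLookup deps f [] ∧ c ∉ pvLookup deps f [] ∧ d ∉ pvLookup deps f [] ∧ e ∉ pvLookup deps f [] ∧ g ∉ pvLookup deps f [] ∧ h ∉ pvLookup deps f []) := by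
  unfold pvFresh
  constructor
  · rintro ⟨hs, hr⟩
    exact ⟨hs, hr 0 (by omega) (by omega), hr 1 (by omega) (by omega), hr 2 (by omega) (by omega), hr 3 (by omega) (by omega), hr 4 (by omega) (by omega), hr 6 (by omega) (by omega), hr 7 (by omega) (by omega)⟩
  · rintro ⟨hs, h0, h1, h2, h3, h4, h6, h7⟩
    refine ⟨hs, ?_⟩
    intro j hj hne
    interval_cases j
    · exact h0
    · exact h1
    · exact h2
    · exact h3
    · exact h4
    · exact absurd rfl hne
    · exact h6
    · exact h7

theorem fresh_iff_row5 (a b c d e f g h : String) (deps : List (String × List String)) (state : List (String × Bool)) :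
    pvFresh [a,b,c,d,e,f,g,h] deps state 5 ↔ pvFreshRow [a,b,c,d,e,f,g,h] deps state 5 = true := by
  rw [freshE5, row5]
  simp only [Bool.and_eq_true, Bool.not_eq_eq_eq_not, Bool.not_true, List.contains_eq_mem,
    decide_eq_false_iff_not]
  tauto

theorem freshE6 (a b c d e f g h : String) (deps : List (String × List String)) (state : List (String × Bool)) :
    pvFresh [a,b,c,d,e,f,g,h] deps state 6 ↔ (pvLookup state g false = true ∧ a ∉ pvLookup deps g [] ∧ b ∉ pvLookup deps g [] ∧ c ∉ pvLookup deps g [] ∧ d ∉ pvLookup deps g [] ∧ e ∉ pvLookup deps g [] ∧ f ∉ pvLookup deps g [] ∧ h ∉ pvLookup deps g []) := by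
  unfold pvFresh
  constructor
  · rintro ⟨hs, hr⟩
    exact ⟨hs, hr 0 (by omega) (by omega), hr 1 (by omega) (by omega), hr 2 (by omega) (by omega), hr 3 (by omega) (by omega), hr 4 (by omega) (by omega), hr 5 (by omega) (by omega), hr 7 (by omega) (by omega)⟩
  · rintro ⟨hs, h0, h1, h2, h3, h4, h5, h7⟩
    refine ⟨hs, ?_⟩
    intro j hj hne
    interval_cases j
    · exact h0
    · exact h1
    · exact h2
    · exact h3
    · exact h4
    · exact h5
    · exact absurd rfl hne
    · exact h7

theorem fresh_iff_row6 (a b c d e f g h : String) (deps : List (String × List String)) (state : List (String × Bool)) :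
    pvFresh [a,b,c,d,e,f,g,h] deps state 6 ↔ pvFreshRow [a,b,c,d,e,f,g,h] deps state 6 = true := by
  rw [freshE6, row6]
  simp only [Bool.and_eq_true, Bool.not_eq_eq_eq_not, Bool.not_true, List.contains_eq_mem,
    decide_eq_false_iff_not]
  tauto

theorem main_eq (args : List String) (deps : List (String × List String)) (constructions : List (String × List (List String))) (state : List (String × Bool))
    (hD : ¬ D_translate_eqangle args deps constructions state) :
    translate_eqangle args deps constructions state = translate_eqangle_alt args deps constructions state := by
  by_cases hlen : args.length = 8
  · rcases args with _ | ⟨a, _ | ⟨b, _ | ⟨c, _ | ⟨d, _ | ⟨e, _ | ⟨f, _ | ⟨g, _ | ⟨h, _ | ⟨x, rest⟩⟩⟩⟩⟩⟩⟩⟩⟩ <;>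
      simp only [List.length_cons, List.length_nil] at hlen <;> try omega
    have hne : ¬(([a,b,c,d,e,f,g,h] : List String).length ≠ 8) := by simp
    simp only [translate_eqangle, translate_eqangle_alt, if_neg hne, pvTryRows]
    rw [← row4 a b c d e f g h deps state, ← row5 a b c d e f g h deps state,
        ← row6 a b c d e f g h deps state, ← row7 a b c d e f g h deps state,
        ← row0 a b c d e f g h deps state, ← row1 a b c d e f g h deps state,
        ← row2 a b c d e f g h deps state, ← row3 a b c d e f g h deps state]
    cases h4 : pvFreshRow [a,b,c,d,e,f,g,h] deps state 4 with
    | true => simp [h4]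
    | false =>
    cases h5 : pvFreshRow [a,b,c,d,e,f,g,h] deps state 5 with
    | true => simp [h4, h5]
    | false =>
    have h6 : pvFreshRow [a,b,c,d,e,f,g,h] deps state 6 = false := by
      by_contra hc
      apply hD
      refine ⟨by simp, ?_, ?_, (fresh_iff_row6 a b c d e f g h deps state).mpr (by simpa using hc)⟩
      · intro hf; rw [fresh_iff_row4 a b c d e f g h deps state] at hf; simp [hf] at h4
      · intro hf; rw [fresh_iff_row5 a b c d e f g h deps state] at hf; simp [hf] at h5
    cases h7 : pvFreshRow [a,b,c,d,e,f,g,h] deps state 7 with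
    | true => simp [h4, h5, h6, h7]
    | false =>
    cases h0 : pvFreshRow [a,b,c,d,e,f,g,h] deps state 0 with
    | true => simp [h4, h5, h6, h7, h0]
    | false =>
    cases h1 : pvFreshRow [a,b,c,d,e,f,g,h] deps state 1 with
    | true => simp [h4, h5, h6, h7, h0, h1]
    | false =>
    cases h2 : pvFreshRow [a,b,c,d,e,f,g,h] deps state 2 with
    | true => simp [h4, h5, h6, h7, h0, h1, h2]
    | false =>
    cases h3 : pvFreshRow [a,b,c,d,e,f,g,h] deps state 3 with
    | true => simp [h4, h5, h6, h7, h0, h1, h2, h3]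
    | false => simp [h4, h5, h6, h7, h0, h1, h2, h3]
  · simp [translate_eqangle, translate_eqangle_alt, hlen]

-- ===== VERDICT =====
theorem translate_eqangle_spec : Claim_unchanged_translate_eqangle := by
  intro args deps constructions state _ _ hD
  exact main_eq args deps constructions state hD

theorem translate_eqangle_changed : Claim_changed_translate_eqangle := by
  unfold Claim_changed_translate_eqangle; decide

theorem translate_eqangle_tight : Claim_exact_translate_eqangle := by
  intro args deps constructions state _ _ hD
  obtain ⟨hlen, hf4, hf5, hf6⟩ := hD
  rcases args with _ | ⟨a, _ | ⟨b, _ | ⟨c, _ | ⟨d, _ | ⟨e, _ | ⟨f, _ | ⟨g, _ | ⟨h, _ | ⟨x, rest⟩⟩⟩⟩⟩⟩⟩⟩⟩ <;>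
    simp only [List.length_cons, List.length_nil] at hlen <;> try omega
  have h4 : pvFreshRow [a,b,c,d,e,f,g,h] deps state 4 = false := by
    by_contra hc; exact hf4 ((fresh_iff_row4 a b c d e f g h deps state).mpr (by simpa using hc))
  have h5 : pvFreshRow [a,b,c,d,e,f,g,h] deps state 5 = false := by
    by_contra hc; exact hf5 ((fresh_iff_row5 a b c d e f g h deps state).mpr (by simpa using hc))
  have h6 : pvFreshRow [a,b,c,d,e,f,g,h] deps state 6 = true := (fresh_iff_row6 a b c d e f g h deps state).mp hf6
  have hne : ¬(([a,b,c,d,e,f,g,h] : List String).length ≠ 8) := by simp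
  have hA : translate_eqangle [a,b,c,d,e,f,g,h] deps constructions state = false := by
    simp only [translate_eqangle, if_neg hne]
    rw [← row4 a b c d e f g h deps state, ← row5 a b c d e f g h deps state,
        ← row6 a b c d e f g h deps state]
    simp [h4, h5, h6]
  have hB : translate_eqangle_alt [a,b,c,d,e,f,g,h] deps constructions state = true := by
    simp only [translate_eqangle_alt, if_neg hne, pvTryRows]
    simp [h6]
  simp [hA, hB]
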